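-- pv_equiv track=rewrite | github.com/BhaveshxPurohit/Task_04_Descriptive-Statistics | Pure_Python.py | detect_unpackable_columns
-- ===== SOURCE A (Python) =====
-- def is_likely_multi_valued(val):
--     if not val or not isinstance(val, str):
--         return False
--     val = val.strip()
--     if any(val.startswith(c) for c in ['{', '[', '(']):
--         return True
--     if any(d in val for d in [',', '|', ';']):
--         return True
--     return False
--
-- def detect_unpackable_columns(data):
--     unpackables = []
--     for col in data[0]:
--         for row in data:
--             val = row.get(col, '')
--             if is_likely_multi_valued(val):
--                 unpackables.append(col)
--                 break
--     return unpackables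
-- ===== SOURCE B (Python) =====
-- def is_likely_multi_valued(val):
--     if not val or not isinstance(val, str):
--         return False
--     val = val.strip()
--     if any(val.startswith(c) for c in ['{', '[', '(']):
--         return True
--     if any(d in val for d in [',', '|', ';']):
--         return True
--     return False
--
-- def detect_unpackable_columns(data):
--     # scan each row's items directly (no per-column dict lookups, no get calls):
--     # collect every key whose value is multi-valued, then restore data[0] order.
--     found = set()
--     for row in data:
--         for key, val in row.items():
--             if is_likely_multi_valued(val):
--                 found.add(key)
--     return [col for col in data[0] if col in found]
-- ===== Notes on version B (the rewrite author's own statement) =====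
-- stated objective: alternative
-- what changed: Instead of scanning rows per column via row.get lookups with an early break, B never looks anything up by key: it iterates each row's items once, collecting keys with multi-valued values into a set, and finally filters data[0]'s keys by membership; keys absent from data[0] are dropped and missing keys default to '' which is never multi-valued, so results coincide.
-- outside the precondition, e.g. on detect_unpackable_columns([]): A raises IndexError, B raises IndexError
import Mathlib
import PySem

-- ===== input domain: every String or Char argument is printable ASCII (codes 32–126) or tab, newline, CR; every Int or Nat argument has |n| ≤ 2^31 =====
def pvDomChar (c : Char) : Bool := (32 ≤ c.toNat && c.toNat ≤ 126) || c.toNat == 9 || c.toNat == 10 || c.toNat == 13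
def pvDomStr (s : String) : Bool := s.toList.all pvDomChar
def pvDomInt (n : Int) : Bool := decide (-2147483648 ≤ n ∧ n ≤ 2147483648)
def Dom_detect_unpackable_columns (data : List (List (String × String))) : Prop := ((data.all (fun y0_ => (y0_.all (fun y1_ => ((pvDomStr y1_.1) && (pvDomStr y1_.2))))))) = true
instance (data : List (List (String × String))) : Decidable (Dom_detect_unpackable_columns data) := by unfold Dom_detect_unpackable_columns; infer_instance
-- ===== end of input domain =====

-- B traverses each row's items once instead of scanning rows per column via lookups; return-value equivalence only.

-- ===== PORT A =====
-- shared helper: both Pythons contain the identical is_likely_multi_valued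
def isLikelyMultiValued (val : String) : Bool :=
  if val == "" then false
  else
    let v := PySem.Str.strip val
    if ["{", "[", "("].any (fun c => PySem.Str.startswith v c) then true
    else if [",", "|", ";"].any (fun d => PySem.Str.isIn d v) then true
    else false

-- A's inner 'for row in data: … break' loop for one column
def aScanRows (data : List (List (String × String))) (col : String) : Bool :=
  match data with
  | [] => false
  | row :: rest =>
    if isLikelyMultiValued ((PySem.Dict.ofList row).getD col "") then true
    else aScanRows rest col

def detect_unpackable_columns (data : List (List (String × String))) : List String :=
  (PySem.Dict.ofList (data.headD [])).keys.foldl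
    (fun unpackables col =>
      if aScanRows data col then unpackables ++ [col] else unpackables) []

-- ===== PORT B =====
-- B's inner loop: for key, val in row.items(): if multi-valued, found.add(key)
def bRow (found : PySem.Set String) (row : List (String × String)) : PySem.Set String :=
  (PySem.Dict.ofList row).items.foldl
    (fun f kv => if isLikelyMultiValued kv.2 then PySem.Set.add f kv.1 else f) found

def detect_unpackable_columns_alt (data : List (List (String × String))) : List String :=
  let found := data.foldl bRow PySem.Set.empty
  (PySem.Dict.ofList (data.headD [])).keys.filter (fun col => PySem.Set.contains found col)

-- ===== PRECONDITION & SPEC =====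
-- Pre_ excludes only the empty list, on which data[0] raises IndexError in A (and in B alike).
def Pre_detect_unpackable_columns (data : List (List (String × String))) : Prop := data ≠ []
instance (data : List (List (String × String))) : Decidable (Pre_detect_unpackable_columns data) := by unfold Pre_detect_unpackable_columns; infer_instance
def pvWitness_detect_unpackable_columns : (List (List (String × String))) := [[("a", "1,2"), ("b", "x")]]

def Spec_detect_unpackable_columns (data : List (List (String × String))) (out : List String) : Prop := out = detect_unpackable_columns_alt data
instance (data : List (List (String × String))) (out : List String) : Decidable (Spec_detect_unpackable_columns data out) := by unfold Spec_detect_unpackable_columns; infer_instance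

-- ===== CLAIM (what is proved, stated in full; the proofs are below) =====
def Claim_equal_detect_unpackable_columns : Prop := ∀ (data : List (List (String × String))), Dom_detect_unpackable_columns data → Pre_detect_unpackable_columns data → Spec_detect_unpackable_columns data (detect_unpackable_columns data)

-- ===== LEMMAS AND PROOFS =====

theorem aScanRows_eq_any (data : List (List (String × String))) (col : String) :
    aScanRows data col = data.any (fun row => isLikelyMultiValued ((PySem.Dict.ofList row).getD col "")) := by
  induction data with
  | nil => rfl
  | cons row rest ih => simp [aScanRows, ih]

theorem mem_items_fold (l : List (String × String)) (found : PySem.Set String) (col : String) :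
    col ∈ l.foldl (fun f kv => if isLikelyMultiValued kv.2 then PySem.Set.add f kv.1 else f) found ↔
      col ∈ found ∨ ∃ kv ∈ l, kv.1 = col ∧ isLikelyMultiValued kv.2 = true := by
  induction l generalizing found with
  | nil => simp
  | cons kv rest ih =>
    simp only [List.foldl_cons, ih, List.mem_cons]
    constructor
    · rintro (h | ⟨p, hp, hpc, hpm⟩)
      · split_ifs at h with hm
        · rcases (PySem.Set.mem_add _ _ _).mp h with h | h
          · exact Or.inl h
          · exact Or.inr ⟨kv, Or.inl rfl, h.symm, hm⟩
        · exact Or.inl h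
      · exact Or.inr ⟨p, Or.inr hp, hpc, hpm⟩
    · rintro (h | ⟨p, (rfl | hp), hpc, hpm⟩)
      · left; split_ifs with hm
        · exact (PySem.Set.mem_add _ _ _).mpr (Or.inl h)
        · exact h
      · left; simp [hpm, PySem.Set.mem_add, hpc]
      · exact Or.inr ⟨p, hp, hpc, hpm⟩

-- per row: some item of the row's dict has key col and a multi-valued value ↔ the get-with-default is multi-valued
theorem row_bridge (row : List (String × String)) (col : String) :
    (∃ kv ∈ (PySem.Dict.ofList row).items, kv.1 = col ∧ isLikelyMultiValued kv.2 = true) ↔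
      isLikelyMultiValued ((PySem.Dict.ofList row).getD col "") = true := by
  have hnd : (PySem.Dict.ofList row).keys.Nodup := PySem.Dict.nodup_keys_ofList row
  constructor
  · rintro ⟨⟨k, v⟩, hmem, rfl, hm⟩
    rw [PySem.Dict.getD_of_mem_items _ hmem hnd]; exact hm
  · intro h
    cases hg : (PySem.Dict.ofList row).get? col with
    | none =>
      rw [PySem.Dict.getD_of_get?_eq_none _ _ hg] at h
      exact absurd h (by decide)
    | some v =>
      rw [PySem.Dict.getD_of_get?_eq_some _ _ hg] at h
      exact ⟨(col, v), PySem.Dict.mem_items_of_get?_eq_some _ hg, rfl, h⟩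

theorem mem_found (data : List (List (String × String))) (found : PySem.Set String) (col : String) :
    col ∈ data.foldl bRow found ↔
      col ∈ found ∨ ∃ row ∈ data, isLikelyMultiValued ((PySem.Dict.ofList row).getD col "") = true := by
  induction data generalizing found with
  | nil => simp
  | cons row rest ih =>
    simp only [List.foldl_cons, ih, bRow, mem_items_fold, List.mem_cons]
    rw [row_bridge]
    constructor
    · rintro ((h | h) | ⟨r, hr, hm⟩)
      · exact Or.inl h
      · exact Or.inr ⟨row, Or.inl rfl, h⟩
      · exact Or.inr ⟨r, Or.inr hr, hm⟩
    · rintro (h | ⟨r, (rfl | hr), hm⟩)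
      · exact Or.inl (Or.inl h)
      · exact Or.inl (Or.inr hm)
      · exact Or.inr ⟨r, hr, hm⟩

-- ===== VERDICT (by name: the statement is the Claim_ definition above) =====
theorem detect_unpackable_columns_spec : Claim_equal_detect_unpackable_columns := by
  intro data _ _
  unfold Spec_detect_unpackable_columns detect_unpackable_columns detect_unpackable_columns_alt
  rw [PySem.List.foldl_append_if_eq_filter]
  simp only [List.nil_append]
  apply (List.filter_congr _).symm
  intro col _
  rw [aScanRows_eq_any, Bool.eq_iff_iff]
  simp [mem_found, PySem.Set.empty, List.any_eq_true]
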